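-- pv_equiv track=rewrite | github.com/txje/Unicycler | lib/assembly_graph.py | split_path_multiple
-- ===== SOURCE A (Python) =====
-- def split_path(path, seg):
--     '''
--     If val is in the list, it returns multiple lists split at that point, excluding val.
--     Sort of like the string split function, but it throws out lists of 1 (because they aren't
--     useful as paths).
--     '''
--     return_paths = []
--     while seg in path:
--         seg_i = path.index(seg)
--         return_paths.append(path[:seg_i])
--         path = path[seg_i+1:]
--     return_paths.append(path)
--     return_paths = [x for x in return_paths if len(x) > 1]
--     return return_paths
--
-- def split_path_multiple(path, segs):
--     '''
--     Like split_path, but vals is a list of vals, all of which split the list.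
--     '''
--     path_parts = [path]
--     for seg in segs:
--         new_path_parts = []
--         for part in path_parts:
--             new_path_parts += split_path(part, seg)
--         path_parts = new_path_parts
--     return path_parts
-- ===== SOURCE B (Python) =====
-- def split_path_multiple(path, segs):
--     '''
--     Like split_path, but vals is a list of vals, all of which split the list.
--     '''
--     if not segs:
--         return [path]
--     seg_set = set(segs)
--     parts = []
--     current = []
--     for x in path:
--         if x in seg_set:
--             if len(current) > 1:
--                 parts.append(current)
--             current = []
--         else:
--             current.append(x)
--     if len(current) > 1:
--         parts.append(current)
--     return parts
-- ===== Notes on version B (the rewrite author's own statement) =====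
-- stated objective: faster
-- what changed: Replaces the per-seg repeated list.index/slice splitting rounds (one full pass over all parts per seg, each with quadratic index+slice work) by a single left-to-right pass over path with a set of segs and a current-run accumulator, flushing runs of length > 1.
import Mathlib
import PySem

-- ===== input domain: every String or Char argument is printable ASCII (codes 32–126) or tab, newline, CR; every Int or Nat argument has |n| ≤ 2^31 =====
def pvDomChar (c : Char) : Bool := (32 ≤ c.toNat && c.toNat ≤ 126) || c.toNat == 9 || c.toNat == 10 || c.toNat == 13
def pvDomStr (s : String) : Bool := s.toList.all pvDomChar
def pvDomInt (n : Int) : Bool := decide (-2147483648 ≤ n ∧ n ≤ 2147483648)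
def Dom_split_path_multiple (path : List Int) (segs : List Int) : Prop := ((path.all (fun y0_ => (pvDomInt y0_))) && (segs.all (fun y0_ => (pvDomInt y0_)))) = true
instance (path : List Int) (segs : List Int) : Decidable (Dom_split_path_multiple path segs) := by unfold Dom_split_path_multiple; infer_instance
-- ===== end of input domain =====

-- B replaces A's per-seg rounds of repeated list.index + slicing by a single pass over
-- path with a set of segs and a current-run accumulator (asymptotically faster).

-- ===== PORT A =====
-- while seg in path: seg_i = path.index(seg); append path[:seg_i]; path = path[seg_i+1:]
-- (path.index on a present element is List.idxOf; the slices path[:i], path[i+1:] with the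
--  nonnegative i that index returns are exactly List.take i / List.drop (i+1))
def split_path_loop (seg : Int) (acc : List (List Int)) (path : List Int) : List (List Int) :=
  if h : seg ∈ path then
    split_path_loop seg (acc ++ [path.take (path.idxOf seg)]) (path.drop (path.idxOf seg + 1))
  else
    acc ++ [path]
termination_by path.length
decreasing_by
  have := List.idxOf_lt_length_of_mem h
  simp only [List.length_drop]
  omega

def split_path (path : List Int) (seg : Int) : List (List Int) :=
  (split_path_loop seg [] path).filter (fun x => decide (1 < x.length))

def split_path_multiple (path : List Int) (segs : List Int) : List (List Int) :=
  segs.foldl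
    (fun path_parts seg =>
      path_parts.foldl (fun new_path_parts part => new_path_parts ++ split_path part seg) [])
    [path]

-- ===== PORT B =====
def split_path_multiple_alt (path : List Int) (segs : List Int) : List (List Int) :=
  if segs = [] then [path]
  else
    let seg_set : PySem.Set Int := PySem.Set.ofList segs
    let st := path.foldl
      (fun (pc : List (List Int) × List Int) x =>
        if PySem.Set.contains seg_set x then
          (if 1 < pc.2.length then pc.1 ++ [pc.2] else pc.1, [])
        else
          (pc.1, pc.2 ++ [x]))
      ([], [])
    if 1 < st.2.length then st.1 ++ [st.2] else st.1

-- ===== PRECONDITION & SPEC =====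
def Spec_split_path_multiple (path : List Int) (segs : List Int) (out : List (List Int)) : Prop := out = split_path_multiple_alt path segs
instance (path : List Int) (segs : List Int) (out : List (List Int)) : Decidable (Spec_split_path_multiple path segs out) := by unfold Spec_split_path_multiple; infer_instance

-- ===== CLAIM (what is proved, stated in full; the proofs are below) =====
def Claim_equal_split_path_multiple : Prop := ∀ (path : List Int) (segs : List Int), Dom_split_path_multiple path segs → Spec_split_path_multiple path segs (split_path_multiple path segs)

-- ===== LEMMAS AND PROOFS =====

-- runs q p = (first maximal run of non-q elements, the remaining runs), splitting p at q-elements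
def runs (q : Int → Bool) : List Int → List Int × List (List Int)
  | [] => ([], [])
  | x :: xs =>
    let r := runs q xs
    if q x then ([], r.1 :: r.2) else (x :: r.1, r.2)

-- all parts of p split at q-elements (including empty ones), in order
def allParts (q : Int → Bool) (p : List Int) : List (List Int) :=
  (runs q p).1 :: (runs q p).2

def keepLong (l : List (List Int)) : List (List Int) := l.filter (fun x => decide (1 < x.length))

theorem runs_congr (q q' : Int → Bool) (h : ∀ x, q x = q' x) (p : List Int) :
    runs q p = runs q' p := by
  have : q = q' := funext h
  subst this; rfl

theorem allParts_not_mem (seg : Int) (p : List Int) (h : seg ∉ p) :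
    allParts (· == seg) p = [p] := by
  induction p with
  | nil => rfl
  | cons x xs ih =>
    simp only [List.mem_cons, not_or] at h
    have hx : (x == seg) = false := by simp [Ne.symm h.1]
    have := ih h.2
    simp only [allParts, runs, hx, Bool.false_eq_true, if_false] at *
    simp_all

theorem allParts_mem (seg : Int) (p : List Int) (h : seg ∈ p) :
    allParts (· == seg) p =
      p.take (p.idxOf seg) :: allParts (· == seg) (p.drop (p.idxOf seg + 1)) := by
  induction p with
  | nil => cases h
  | cons x xs ih =>
    by_cases hx : x = seg
    · subst hx
      simp [allParts, runs, List.idxOf_cons_self]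
    · have hmem : seg ∈ xs := by
        rcases List.mem_cons.mp h with h1 | h1
        · exact absurd h1.symm hx
        · exact h1
      have hxb : (x == seg) = false := by simp [hx]
      have hidx : (x :: xs).idxOf seg = xs.idxOf seg + 1 := by
        simp [List.idxOf_cons, hxb]
      have := ih hmem
      simp only [allParts] at this ⊢
      rw [hidx]
      simp only [runs, hxb, Bool.false_eq_true, if_false, List.take_succ_cons,
        List.drop_succ_cons]
      rw [List.cons.injEq] at this
      simp [this.1, this.2]

theorem split_path_loop_eq (seg : Int) (acc : List (List Int)) (path : List Int) :
    split_path_loop seg acc path = acc ++ allParts (· == seg) path := by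
  induction acc, path using split_path_loop.induct seg with
  | case1 acc path h ih =>
    rw [split_path_loop, dif_pos h, ih, allParts_mem seg path h]
    simp
  | case2 acc path h =>
    rw [split_path_loop, dif_neg h, allParts_not_mem seg path h]

theorem split_path_eq (path : List Int) (seg : Int) :
    split_path path seg = keepLong (allParts (· == seg) path) := by
  rw [split_path, split_path_loop_eq, List.nil_append]; rfl

-- every part produced by runs is no longer than the input
theorem runs_len (q : Int → Bool) (p : List Int) :
    (runs q p).1.length ≤ p.length ∧ ∀ r ∈ (runs q p).2, r.length ≤ p.length := by
  induction p with
  | nil => simp [runs]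
  | cons x xs ih =>
    simp only [runs]
    by_cases hx : q x
    · simp only [hx, if_true]
      constructor
      · simp
      · intro r hr
        rcases List.mem_cons.mp hr with h | h
        · subst h; simp only [List.length_cons]; omega
        · have := ih.2 r h; simp only [List.length_cons]; omega
    · simp only [Bool.not_eq_true] at hx
      simp only [hx, Bool.false_eq_true, if_false]
      constructor
      · simp only [List.length_cons]; omega
      · intro r hr
        have := ih.2 r hr; simp only [List.length_cons]; omega

theorem keepLong_allParts_short (s : Int) (p : List Int) (h : p.length ≤ 1) :
    keepLong (allParts (· == s) p) = [] := by
  have hl := runs_len (· == s) p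
  simp only [keepLong, allParts, List.filter_cons]
  have h1 : ¬ (1 < (runs (· == s) p).1.length) := by omega
  simp only [decide_eq_true_eq, h1, if_false]
  rw [List.filter_eq_nil_iff]
  intro r hr
  have := hl.2 r hr
  simp only [decide_eq_true_eq]
  omega

-- refining a split: splitting at (q or == s) = splitting at q, then each part at s
theorem runs_or (q : Int → Bool) (s : Int) (p : List Int) :
    runs (fun x => q x || x == s) p =
      ((runs (· == s) (runs q p).1).1,
       (runs (· == s) (runs q p).1).2 ++ (runs q p).2.flatMap (allParts (· == s))) := by
  induction p with
  | nil => simp [runs]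
  | cons x xs ih =>
    by_cases hq : q x
    · simp only [runs, hq, Bool.true_or, if_true, ih]
      simp [allParts, List.cons_append]
    · by_cases hs : x = s
      · subst hs
        simp only [runs, hq, BEq.rfl, Bool.or_true, if_true, ih, Bool.false_eq_true,
          if_false]
        simp only [List.cons_append]
      · have hsb : (x == s) = false := by simp [hs]
        simp only [runs, hq, hsb, Bool.or_false, Bool.false_eq_true, if_false, ih]

theorem allParts_or (q : Int → Bool) (s : Int) (p : List Int) :
    allParts (fun x => q x || x == s) p =
      (allParts q p).flatMap (allParts (· == s)) := by
  simp only [allParts, runs_or, List.flatMap_cons]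
  rfl

-- A's inner loop over the parts, with short parts dropped before or after splitting alike
theorem flatMap_keepLong (s : Int) (L : List (List Int)) :
    (keepLong L).flatMap (fun part => keepLong (allParts (· == s) part)) =
      L.flatMap (fun part => keepLong (allParts (· == s) part)) := by
  induction L with
  | nil => rfl
  | cons part L ih =>
    simp only [keepLong, List.filter_cons, decide_eq_true_eq] at ih ⊢
    by_cases h : 1 < part.length
    · simp only [h, if_true, List.flatMap_cons]
      rw [ih]
    · have h0 := keepLong_allParts_short s part (by omega)
      simp only [keepLong] at h0
      simp only [h, if_false, List.flatMap_cons, h0, List.nil_append]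
      exact ih

theorem keepLong_flatMap (s : Int) (L : List (List Int)) :
    keepLong (L.flatMap (allParts (· == s))) =
      L.flatMap (fun part => keepLong (allParts (· == s) part)) := by
  simp [keepLong, List.filter_flatMap]

-- the A-side fold invariant
theorem A_fold (path : List Int) (segs : List Int) : ∀ (q : Int → Bool),
    segs.foldl
      (fun path_parts seg =>
        path_parts.foldl (fun new_path_parts part => new_path_parts ++ split_path part seg) [])
      (keepLong (allParts q path)) =
      keepLong (allParts (fun x => q x || segs.any (x == ·)) path) := by
  induction segs with
  | nil =>
    intro q
    simp only [List.foldl_nil, List.any_nil, Bool.or_false]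
  | cons s rest ih =>
    intro q
    rw [List.foldl_cons]
    have hstep :
        (keepLong (allParts q path)).foldl
          (fun new_path_parts part => new_path_parts ++ split_path part s) [] =
        keepLong (allParts (fun x => q x || x == s) path) := by
      rw [PySem.List.foldl_append_eq_flatMap, List.nil_append]
      have : (fun part => split_path part s) =
          (fun part => keepLong (allParts (· == s) part)) := by
        funext part; exact split_path_eq part s
      rw [this, flatMap_keepLong, ← keepLong_flatMap, ← allParts_or]
    rw [hstep, ih (fun x => q x || x == s)]
    congr 1
    unfold allParts
    rw [runs_congr _ (fun x => q x || (s :: rest).any (x == ·))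
      (by intro x; simp [List.any_cons, Bool.or_assoc])]

-- the B-side fold invariant
theorem B_fold (q : Int → Bool) (p : List Int) :
    ∀ (parts : List (List Int)) (cur : List Int),
    (let st := p.foldl
        (fun (pc : List (List Int) × List Int) x =>
          if q x then
            (if 1 < pc.2.length then pc.1 ++ [pc.2] else pc.1, [])
          else
            (pc.1, pc.2 ++ [x]))
        (parts, cur)
     if 1 < st.2.length then st.1 ++ [st.2] else st.1) =
      parts ++ keepLong ((cur ++ (runs q p).1) :: (runs q p).2) := by
  induction p with
  | nil =>
    intro parts cur
    simp only [List.foldl_nil, runs, List.append_nil, keepLong, List.filter_cons,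
      List.filter_nil, decide_eq_true_eq]
    by_cases h : 1 < cur.length <;> simp [h]
  | cons x xs ih =>
    intro parts cur
    by_cases hx : q x
    · simp only [List.foldl_cons, hx, if_true]
      rw [ih]
      simp only [runs, hx, if_true, keepLong, List.filter_cons, decide_eq_true_eq,
        List.nil_append]
      by_cases h : 1 < cur.length <;> simp [h]
    · simp only [List.foldl_cons, hx]
      rw [ih]
      simp only [runs, hx, Bool.false_eq_true, if_false]
      simp [List.append_assoc]

-- ===== VERDICT (by name: the statement is the Claim_ definition above) =====
theorem contains_ofList_eq_any (segs : List Int) (x : Int) :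
    PySem.Set.contains (PySem.Set.ofList segs) x = segs.any (x == ·) := by
  have h1 : (PySem.Set.contains (PySem.Set.ofList segs) x = true) ↔
      (segs.any (x == ·) = true) := by
    rw [PySem.Set.contains_iff, PySem.Set.mem_ofList]
    simp [List.any_eq_true]
  exact Bool.eq_iff_iff.mpr h1

theorem alt_eq_keepLong (path : List Int) (segs : List Int) (hsegs : segs ≠ []) :
    split_path_multiple_alt path segs =
      keepLong (allParts (fun x => PySem.Set.contains (PySem.Set.ofList segs) x) path) := by
  unfold split_path_multiple_alt
  rw [if_neg hsegs]
  have := B_fold (fun x => PySem.Set.contains (PySem.Set.ofList segs) x) path [] []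
  simp only [List.nil_append] at this ⊢
  exact this

-- ===== VERDICT (by name: the statement is the Claim_ definition above) =====
theorem split_path_multiple_spec : Claim_equal_split_path_multiple := by
  intro path segs _
  unfold Spec_split_path_multiple
  match segs with
  | [] => rfl
  | s :: rest =>
    rw [alt_eq_keepLong path (s :: rest) (by simp)]
    unfold split_path_multiple
    rw [List.foldl_cons]
    have hfirst :
        ([path].foldl (fun new_path_parts part => new_path_parts ++ split_path part s) []) =
          keepLong (allParts (· == s) path) := by
      simp [split_path_eq]
    rw [hfirst, A_fold path rest (· == s)]
    congr 1
    unfold allParts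
    rw [runs_congr _ (fun x => PySem.Set.contains (PySem.Set.ofList (s :: rest)) x)
      (by intro x; simp only [contains_ofList_eq_any, List.any_cons])]
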